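-- pv_equiv track=rewrite | github.com/chloeward00/CA318-Advanced-Algorithms-and-AI-Search | w6-DynmaicProgramming/CommonSubsequenceOrNot.py | is_common_subsequence
-- ===== SOURCE A (Python) =====
-- def is_common_subsequence(word1, word2,word3):
--
--     word1_copy = list(word1)
--     word1 = list(word1)
--     word1_copy3 = list(word1)
--     for letter in word2:
--         if word1 and word1[0] == letter:
--             word1.pop(0)
--
--     for letter2 in word3:
--        if word1_copy and word1_copy[0] == letter2:
--             word1_copy.pop(0)
--
--     if len(word1) == 0 and len(word1_copy) == 0:
--         return True
--     else:
--         return False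
-- ===== SOURCE B (Python) =====
-- def is_common_subsequence(word1, word2, word3):
--     def greedy_match(scan):
--         i = 0
--         n = len(word1)
--         for ch in scan:
--             if i < n and word1[i] == ch:
--                 i += 1
--         return i == n
--     return greedy_match(word2) and greedy_match(word3)
-- ===== Notes on version B (the rewrite author's own statement) =====
-- stated objective: faster
-- what changed: Replaced the list-copy + pop(0) greedy scans (each pop shifts the whole remainder) by an index-advancing two-pointer scan over the unchanged string, with short-circuit on the second scan.
import Mathlib
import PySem

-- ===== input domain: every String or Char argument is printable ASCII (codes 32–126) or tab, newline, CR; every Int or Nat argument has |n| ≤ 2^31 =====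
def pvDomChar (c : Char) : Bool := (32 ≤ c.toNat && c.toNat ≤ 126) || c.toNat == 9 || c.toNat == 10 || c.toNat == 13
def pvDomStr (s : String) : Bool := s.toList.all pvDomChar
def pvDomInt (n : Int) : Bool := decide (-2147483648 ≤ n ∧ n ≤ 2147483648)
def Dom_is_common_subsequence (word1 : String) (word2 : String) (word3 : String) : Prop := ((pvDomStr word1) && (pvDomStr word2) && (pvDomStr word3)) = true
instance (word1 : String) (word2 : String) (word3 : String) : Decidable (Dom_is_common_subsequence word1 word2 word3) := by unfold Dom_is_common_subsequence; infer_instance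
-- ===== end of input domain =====

-- B replaces A's list-copying pop(0) greedy scans by an index-advancing two-pointer scan (faster: no per-match shift of the remainder).

-- ===== PORT A =====
-- one iteration of A's loops: 'if word1 and word1[0] == letter: word1.pop(0)'
def popStep (st : List Char) (c : Char) : List Char :=
  match st with
  | [] => []
  | x :: xs => if x = c then xs else x :: xs

def is_common_subsequence (word1 : String) (word2 : String) (word3 : String) : Bool :=
  let word1_copy := word1.toList
  let word1l := word1.toList
  let _word1_copy3 := word1l      -- A builds this copy and never uses it
  let word1' := word2.toList.foldl popStep word1l
  let word1_copy' := word3.toList.foldl popStep word1_copy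
  if word1'.length = 0 ∧ word1_copy'.length = 0 then true else false

-- ===== PORT B =====
-- one iteration of B's loop: 'if i < n and word1[i] == ch: i += 1'
def idxStep (w : List Char) (i : Nat) (c : Char) : Nat :=
  if i < w.length ∧ w.getD i ' ' = c then i + 1 else i

def greedyMatch (w : List Char) (scan : List Char) : Bool :=
  scan.foldl (idxStep w) 0 == w.length

def is_common_subsequence_alt (word1 : String) (word2 : String) (word3 : String) : Bool :=
  greedyMatch word1.toList word2.toList && greedyMatch word1.toList word3.toList

-- ===== PRECONDITION & SPEC =====
def Spec_is_common_subsequence (word1 : String) (word2 : String) (word3 : String) (out : Bool) : Prop := out = is_common_subsequence_alt word1 word2 word3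
instance (word1 : String) (word2 : String) (word3 : String) (out : Bool) : Decidable (Spec_is_common_subsequence word1 word2 word3 out) := by unfold Spec_is_common_subsequence; infer_instance

-- ===== CLAIM (what is proved, stated in full; the proofs are below) =====
def Claim_equal_is_common_subsequence : Prop := ∀ (word1 : String) (word2 : String) (word3 : String), Dom_is_common_subsequence word1 word2 word3 → Spec_is_common_subsequence word1 word2 word3 (is_common_subsequence word1 word2 word3)

-- ===== LEMMAS AND PROOFS =====

-- A's pop(0) state is exactly the suffix of word1 past B's index pointer.
theorem loop_eq (w : List Char) (s : List Char) : ∀ i, i ≤ w.length →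
    s.foldl popStep (w.drop i) = w.drop (s.foldl (idxStep w) i) ∧ s.foldl (idxStep w) i ≤ w.length := by
  induction s with
  | nil => intro i h; exact ⟨rfl, h⟩
  | cons c s ih =>
    intro i h
    simp only [List.foldl_cons]
    have hstep : popStep (w.drop i) c = w.drop (idxStep w i c) ∧ idxStep w i c ≤ w.length := by
      by_cases hi : i < w.length
      · have hdrop : w.drop i = w[i] :: w.drop (i + 1) := List.drop_eq_getElem_cons hi
        by_cases hc : w[i] = c
        · constructor
          · rw [hdrop]; simp [popStep, idxStep, hc, hi]
          · simp only [idxStep, List.getD_eq_getElem _ _ hi]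
            split_ifs <;> omega
        · constructor
          · rw [hdrop]
            simp only [popStep, idxStep, List.getD_eq_getElem _ _ hi]
            simp [hc, hi, ← hdrop]
          · simp only [idxStep, List.getD_eq_getElem _ _ hi]
            split_ifs <;> omega
      · have hie : i = w.length := le_antisymm h (not_lt.mp hi)
        have hnil : w.drop i = [] := List.drop_eq_nil_of_le (le_of_eq hie.symm)
        constructor
        · simp [popStep, idxStep, hi, hnil]
        · simp [idxStep, hi, h]
    rw [hstep.1]
    exact ih (idxStep w i c) hstep.2

-- ===== VERDICT (by name: the statement is the Claim_ definition above) =====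
theorem is_common_subsequence_spec : Claim_equal_is_common_subsequence := by
  intro word1 word2 word3 _
  unfold Spec_is_common_subsequence is_common_subsequence is_common_subsequence_alt greedyMatch
  have h2 := loop_eq word1.toList word2.toList 0 (Nat.zero_le _)
  have h3 := loop_eq word1.toList word3.toList 0 (Nat.zero_le _)
  simp only [List.drop_zero] at h2 h3
  simp only [h2.1, h3.1]
  have hj2 := h2.2
  have hj3 := h3.2
  split_ifs with hp
  · symm
    simp only [Bool.and_eq_true, beq_iff_eq]
    simp only [List.length_drop] at hp
    exact ⟨by omega, by omega⟩
  · symm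
    simp only [List.length_drop] at hp
    simp only [Bool.and_eq_false_iff, beq_eq_false_iff_ne, ne_eq]
    omega
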